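-- pv_equiv track=rewrite | github.com/logarium/macros-engine | parse_el_defs.py | extract_el_def_blocks
-- ===== SOURCE A (Python) =====
-- def extract_el_def_blocks(text_lines):
--     """Extract raw line groups between EL-DEF and END EL-DEF."""
--     blocks = []
--     current = None
--     for line in text_lines:
--         stripped = line.rstrip("\n").rstrip("\r")
--         if stripped.strip() == "EL-DEF":
--             current = []
--         elif stripped.strip() == "END EL-DEF":
--             if current is not None:
--                 blocks.append(current)
--             current = None
--         elif current is not None:
--             current.append(stripped)
--     return blocks
-- ===== SOURCE B (Python) =====
-- def extract_el_def_blocks(text_lines):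
--     """Extract raw line groups between EL-DEF and END EL-DEF.
--
--     Two staged passes instead of a single open-buffer state machine:
--     (1) split the stripped lines into segments terminated by END EL-DEF
--         markers (the unterminated trailing segment yields no block);
--     (2) for each terminated segment, search backwards for its last EL-DEF
--         marker and emit the lines after it (a segment without EL-DEF is an
--         unmatched END and yields nothing).
--     """
--     stripped = [line.rstrip("\n").rstrip("\r") for line in text_lines]
--
--     segments = []
--     seg = []
--     for s in stripped:
--         if s.strip() == "END EL-DEF":
--             segments.append(seg)
--             seg = []
--         else:
--             seg.append(s)
--     # the trailing `seg` has no END EL-DEF after it, so it is dropped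
--
--     blocks = []
--     for seg in segments:
--         tail = _tail_after_last_el_def(seg)
--         if tail is not None:
--             blocks.append(tail)
--     return blocks
--
--
-- def _tail_after_last_el_def(seg):
--     """Lines after the last EL-DEF marker in seg, or None if there is none."""
--     tail = []
--     for s in reversed(seg):
--         if s.strip() == "EL-DEF":
--             tail.reverse()
--             return tail
--         tail.append(s)
--     return None
-- ===== Notes on version B (the rewrite author's own statement) =====
-- stated objective: alternative
-- what changed: Replaces A's single-pass open-buffer state machine by two staged passes: split the stripped lines into END-EL-DEF-terminated segments, then per segment search backwards for the last EL-DEF marker and emit the lines after it.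
import Mathlib
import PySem

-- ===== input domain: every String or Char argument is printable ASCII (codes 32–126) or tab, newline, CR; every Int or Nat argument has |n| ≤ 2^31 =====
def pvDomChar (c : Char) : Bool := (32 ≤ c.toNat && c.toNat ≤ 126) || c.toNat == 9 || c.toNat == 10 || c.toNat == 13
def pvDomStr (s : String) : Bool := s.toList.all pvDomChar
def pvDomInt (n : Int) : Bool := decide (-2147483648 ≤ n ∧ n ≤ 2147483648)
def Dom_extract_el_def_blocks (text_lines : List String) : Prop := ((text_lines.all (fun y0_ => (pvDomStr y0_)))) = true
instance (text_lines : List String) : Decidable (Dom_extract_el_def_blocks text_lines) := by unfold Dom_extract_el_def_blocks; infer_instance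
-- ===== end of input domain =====

-- B replaces A's single-pass open-buffer state machine by two staged passes
-- (split on END EL-DEF markers, then per-segment backward search for the last
-- EL-DEF); not faster, equivalence is exact.

-- ===== PORT A =====
-- s.rstrip(c) for a single-character chars argument: drop all trailing copies of c (exact; PySem has no single-sided rstrip-with-chars).
def pyRstrip1 (s : String) (c : Char) : String :=
  String.mk (((s.toList.reverse).dropWhile (fun x => x == c)).reverse)

-- the body of A's for-loop, on state (blocks, current)
def stepA (st : List (List String) × Option (List String)) (line : String) :
    List (List String) × Option (List String) :=
  let stripped := pyRstrip1 (pyRstrip1 line '\n') '\r'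
  if PySem.Str.strip stripped == "EL-DEF" then (st.1, some [])
  else if PySem.Str.strip stripped == "END EL-DEF" then
    (match st.2 with
     | some cur => st.1 ++ [cur]
     | none => st.1, none)
  else match st.2 with
    | some cur => (st.1, some (cur ++ [stripped]))
    | none => (st.1, none)

def extract_el_def_blocks (text_lines : List String) : List (List String) :=
  (text_lines.foldl stepA ([], none)).1

-- ===== PORT B =====
-- pass 1 of Source B: split the stripped lines into END-EL-DEF-terminated segments;
-- loop body on state (segments, seg)
def segStep (st : List (List String) × List String) (s : String) :
    List (List String) × List String :=
  if PySem.Str.strip s == "END EL-DEF" then (st.1 ++ [st.2], [])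
  else (st.1, st.2 ++ [s])

-- Source B's _tail_after_last_el_def: walk the reversed segment accumulating the
-- tail until an EL-DEF marker is met (then return the tail, re-reversed)
def goTail : List String → List String → Option (List String)
  | [], _ => none
  | s :: r, tail =>
    if PySem.Str.strip s == "EL-DEF" then some tail.reverse
    else goTail r (tail ++ [s])

def tailAfterLastElDef (seg : List String) : Option (List String) :=
  goTail seg.reverse []

def extract_el_def_blocks_alt (text_lines : List String) : List (List String) :=
  let stripped := text_lines.map (fun line => pyRstrip1 (pyRstrip1 line '\n') '\r')
  let segments := (stripped.foldl segStep ([], [])).1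
  segments.filterMap tailAfterLastElDef

-- ===== PRECONDITION & SPEC =====
def Spec_extract_el_def_blocks (text_lines : List String) (out : List (List String)) : Prop := out = extract_el_def_blocks_alt text_lines
instance (text_lines : List String) (out : List (List String)) : Decidable (Spec_extract_el_def_blocks text_lines out) := by unfold Spec_extract_el_def_blocks; infer_instance

-- ===== CLAIM (what is proved, stated in full; the proofs are below) =====
def Claim_equal_extract_el_def_blocks : Prop := ∀ (text_lines : List String), Dom_extract_el_def_blocks text_lines → Spec_extract_el_def_blocks text_lines (extract_el_def_blocks text_lines)

-- ===== LEMMAS AND PROOFS =====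

-- reference recursion on the list of STRIPPED lines, state = the open buffer
def spec (st : Option (List String)) : List String → List (List String)
  | [] => []
  | s :: r =>
    if PySem.Str.strip s == "EL-DEF" then spec (some []) r
    else if PySem.Str.strip s == "END EL-DEF" then
      (match st with
       | some cur => cur :: spec none r
       | none => spec none r)
    else match st with
      | some cur => spec (some (cur ++ [s])) r
      | none => spec none r

-- A's step on an already-stripped line
def stepS (st : List (List String) × Option (List String)) (s : String) :
    List (List String) × Option (List String) :=
  if PySem.Str.strip s == "EL-DEF" then (st.1, some [])
  else if PySem.Str.strip s == "END EL-DEF" then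
    (match st.2 with
     | some cur => st.1 ++ [cur]
     | none => st.1, none)
  else match st.2 with
    | some cur => (st.1, some (cur ++ [s]))
    | none => (st.1, none)

theorem foldl_stepS_spec (l : List String) :
    ∀ (blocks : List (List String)) (st : Option (List String)),
      (List.foldl stepS (blocks, st) l).1 = blocks ++ spec st l := by
  induction l with
  | nil => intro blocks st; simp [spec]
  | cons s r ih =>
    intro blocks st
    by_cases h1 : PySem.Str.strip s == "EL-DEF"
    · simp [List.foldl_cons, stepS, spec, h1, ih]
    · by_cases h2 : PySem.Str.strip s == "END EL-DEF"
      · cases st with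
        | some cur => simp [List.foldl_cons, stepS, spec, h1, h2, ih]
        | none => simp [List.foldl_cons, stepS, spec, h1, h2, ih]
      · cases st with
        | some cur => simp [List.foldl_cons, stepS, spec, h1, h2, ih]
        | none => simp [List.foldl_cons, stepS, spec, h1, h2, ih]

theorem extract_eq_spec (text_lines : List String) :
    extract_el_def_blocks text_lines
      = spec none (text_lines.map (fun line => pyRstrip1 (pyRstrip1 line '\n') '\r')) := by
  unfold extract_el_def_blocks
  have h : List.foldl stepA (([], none) : List (List String) × Option (List String)) text_lines
      = List.foldl stepS ([], none)
          (text_lines.map (fun line => pyRstrip1 (pyRstrip1 line '\n') '\r')) := by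
    rw [List.foldl_map]
    rfl
  rw [h, foldl_stepS_spec]
  simp

-- recursive characterization of the segment splitter
def splitRec : List String → List (List String)
  | [] => []
  | s :: r =>
    if PySem.Str.strip s == "END EL-DEF" then [] :: splitRec r
    else match splitRec r with
      | [] => []
      | seg :: rest => (s :: seg) :: rest

def prefixFirst (acc : List String) : List (List String) → List (List String)
  | [] => []
  | x :: xs => (acc ++ x) :: xs

theorem foldl_segStep_splitRec (l : List String) :
    ∀ (segs : List (List String)) (acc : List String),
      (List.foldl segStep (segs, acc) l).1 = segs ++ prefixFirst acc (splitRec l) := by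
  induction l with
  | nil => intro segs acc; simp [splitRec, prefixFirst]
  | cons s r ih =>
    intro segs acc
    by_cases h : PySem.Str.strip s == "END EL-DEF"
    · cases hr : splitRec r with
      | nil => simp [List.foldl_cons, segStep, h, ih, splitRec, hr, prefixFirst]
      | cons x xs => simp [List.foldl_cons, segStep, h, ih, splitRec, hr, prefixFirst]
    · cases hr : splitRec r with
      | nil => simp [List.foldl_cons, segStep, h, ih, splitRec, hr, prefixFirst]
      | cons x xs => simp [List.foldl_cons, segStep, h, ih, splitRec, hr, prefixFirst]

-- blockOf recurrence
theorem goTail_append (l : List String) (s : String) :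
    ∀ acc, goTail (l ++ [s]) acc
      = match goTail l acc with
        | some b => some b
        | none => if PySem.Str.strip s == "EL-DEF" then some (acc ++ l).reverse else none := by
  induction l with
  | nil => intro acc; by_cases h : PySem.Str.strip s == "EL-DEF" <;> simp [goTail, h]
  | cons t l ih =>
    intro acc
    by_cases h : PySem.Str.strip t == "EL-DEF"
    · simp [goTail, h]
    · have := ih (acc ++ [t])
      simp [goTail, h] at this ⊢
      rw [this]

theorem tailAfter_nil : tailAfterLastElDef [] = none := rfl

theorem tailAfter_cons (s : String) (seg : List String) :
    tailAfterLastElDef (s :: seg)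
      = match tailAfterLastElDef seg with
        | some b => some b
        | none => if PySem.Str.strip s == "EL-DEF" then some seg else none := by
  unfold tailAfterLastElDef
  have : (s :: seg).reverse = seg.reverse ++ [s] := by simp
  rw [this, goTail_append]
  cases goTail seg.reverse [] with
  | some b => rfl
  | none => by_cases h : PySem.Str.strip s == "EL-DEF" <;> simp [h]

-- the two markers are distinct strings
theorem not_both_markers (s : String) (h1 : PySem.Str.strip s == "EL-DEF")
    (h2 : PySem.Str.strip s == "END EL-DEF") : False := by
  have e1 : PySem.Str.strip s = "EL-DEF" := by simpa using h1
  have e2 : PySem.Str.strip s = "END EL-DEF" := by simpa using h2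
  rw [e1] at e2
  exact absurd e2 (by decide)

theorem tailAfter_cons_eldef (s : String) (seg : List String)
    (h : PySem.Str.strip s = "EL-DEF") :
    tailAfterLastElDef (s :: seg) = some ((tailAfterLastElDef seg).getD seg) := by
  rw [tailAfter_cons]
  cases tailAfterLastElDef seg <;> simp [h]

theorem tailAfter_cons_other (s : String) (seg : List String)
    (h : ¬ PySem.Str.strip s = "EL-DEF") :
    tailAfterLastElDef (s :: seg) = tailAfterLastElDef seg := by
  rw [tailAfter_cons]
  cases tailAfterLastElDef seg <;> simp [h]

-- main correspondence: the state machine on stripped lines equals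
-- split-then-backward-search
theorem spec_eq_split (l : List String) :
    spec none l = (splitRec l).filterMap tailAfterLastElDef ∧
    ∀ cur, spec (some cur) l
      = (match splitRec l with
         | [] => []
         | seg :: rest =>
           ((tailAfterLastElDef seg).getD (cur ++ seg)) :: rest.filterMap tailAfterLastElDef) := by
  induction l with
  | nil => simp [spec, splitRec]
  | cons s r ih =>
    obtain ⟨ih1, ih2⟩ := ih
    by_cases h1 : PySem.Str.strip s == "EL-DEF"
    · have h1' : PySem.Str.strip s = "EL-DEF" := by simpa using h1
      have h2 : (PySem.Str.strip s == "END EL-DEF") = false := by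
        rcases hh : PySem.Str.strip s == "END EL-DEF" with _ | _
        · rfl
        · exact absurd (not_both_markers s h1 hh) (by simp)
      have hnone : spec none (s :: r) = spec (some []) r := by simp [spec, h1]
      have hsome : ∀ cur, spec (some cur) (s :: r) = spec (some []) r := by
        intro cur; simp [spec, h1]
      have key := ih2 []
      constructor
      · rw [hnone, key]
        cases hr : splitRec r with
        | nil => simp [splitRec, h2, hr]
        | cons seg rest =>
          simp [splitRec, h2, hr, List.filterMap_cons, tailAfter_cons_eldef s seg h1']
      · intro cur
        rw [hsome cur, key]
        cases hr : splitRec r with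
        | nil => simp [splitRec, h2, hr]
        | cons seg rest =>
          simp [splitRec, h2, hr, tailAfter_cons_eldef s seg h1']
    · by_cases h2 : PySem.Str.strip s == "END EL-DEF"
      · constructor
        · simp [spec, splitRec, h1, h2, ih1, tailAfter_nil, List.filterMap_cons]
        · intro cur
          simp [spec, splitRec, h1, h2, ih1, tailAfter_nil]
      · have h1' : ¬ PySem.Str.strip s = "EL-DEF" := by simpa using h1
        constructor
        · have : spec none (s :: r) = spec none r := by simp [spec, h1, h2]
          rw [this, ih1]
          cases hr : splitRec r with
          | nil => simp [splitRec, h1, h2, hr]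
          | cons seg rest =>
            simp only [splitRec, h2, Bool.false_eq_true, if_false]
            rw [hr]
            rw [List.filterMap_cons, List.filterMap_cons,
              tailAfter_cons_other s seg h1']
        · intro cur
          have : spec (some cur) (s :: r) = spec (some (cur ++ [s])) r := by
            simp [spec, h1, h2]
          rw [this, ih2 (cur ++ [s])]
          cases hr : splitRec r with
          | nil => simp [splitRec, h1, h2, hr]
          | cons seg rest =>
            simp [splitRec, h2, hr, tailAfter_cons_other s seg h1']

theorem alt_eq_spec (text_lines : List String) :
    extract_el_def_blocks_alt text_lines
      = spec none (text_lines.map (fun line => pyRstrip1 (pyRstrip1 line '\n') '\r')) := by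
  show ((text_lines.map (fun line => pyRstrip1 (pyRstrip1 line '\n') '\r')).foldl
      segStep ([], [])).1.filterMap tailAfterLastElDef = _
  rw [foldl_segStep_splitRec, (spec_eq_split _).1]
  cases h : splitRec (text_lines.map (fun line => pyRstrip1 (pyRstrip1 line '\n') '\r')) with
  | nil => simp [prefixFirst, h]
  | cons x xs => simp [prefixFirst, h]

-- ===== VERDICT (by name: the statement is the Claim_ definition above) =====
theorem extract_el_def_blocks_spec : Claim_equal_extract_el_def_blocks := by
  intro text_lines _
  unfold Spec_extract_el_def_blocks
  rw [extract_eq_spec, alt_eq_spec]
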